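-- pv_equiv track=rewrite | github.com/flongo312/Capstone_Project | Data/fred_data.py | find_earliest_common_start_date
-- ===== SOURCE A (Python) =====
-- def find_earliest_common_start_date(series_list):
--     earliest_start_date = '9999-12-31'  # Initialize with a far future date
--     for series in series_list:
--         start_date = series['observation_start']
--         if start_date < earliest_start_date:
--             earliest_start_date = start_date
--
--     earliest_series = [s for s in series_list if s['observation_start'] == earliest_start_date]
--     return earliest_start_date, earliest_series
-- ===== SOURCE B (Python) =====
-- def find_earliest_common_start_date(series_list):
--     # One pass: maintain the running minimum and its bucket simultaneously.
--     earliest_start_date = '9999-12-31'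
--     earliest_series = []
--     for series in series_list:
--         start_date = series['observation_start']
--         if start_date < earliest_start_date:
--             earliest_start_date = start_date
--             earliest_series = [series]
--         elif start_date == earliest_start_date:
--             earliest_series.append(series)
--     return earliest_start_date, earliest_series
-- ===== Notes on version B (the rewrite author's own statement) =====
-- stated objective: alternative
-- what changed: Fused A's two passes (min-finding loop, then a filtering comprehension over the whole list) into a single pass that maintains the running minimum together with its bucket, resetting the bucket on a strictly smaller date.
import Mathlib
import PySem

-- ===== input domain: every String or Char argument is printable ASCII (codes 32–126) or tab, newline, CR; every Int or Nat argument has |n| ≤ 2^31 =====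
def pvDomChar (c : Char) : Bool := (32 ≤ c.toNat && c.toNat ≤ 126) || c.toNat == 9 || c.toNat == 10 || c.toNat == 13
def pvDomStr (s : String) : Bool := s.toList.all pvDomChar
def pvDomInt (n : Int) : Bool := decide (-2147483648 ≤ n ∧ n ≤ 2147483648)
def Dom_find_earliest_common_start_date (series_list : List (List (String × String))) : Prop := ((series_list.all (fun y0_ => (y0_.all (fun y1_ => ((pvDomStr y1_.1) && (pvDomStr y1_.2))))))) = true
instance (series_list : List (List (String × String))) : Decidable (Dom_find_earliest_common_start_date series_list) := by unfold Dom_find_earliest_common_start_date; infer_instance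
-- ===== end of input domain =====

-- B fuses A's two passes (min loop + filter comprehension) into one pass keeping the running minimum with its bucket.


-- series['observation_start'] (dict lookup, first match per the assoc-list convention);
-- Pre_ guarantees the key is present, so the default "" is never used on admitted inputs.
def pvStart (s : List (String × String)) : String :=
  ((PySem.Dict.mk s).get? "observation_start").getD ""

-- ===== PORT A =====
def find_earliest_common_start_date (series_list : List (List (String × String))) : String × (List (List (String × String))) :=
  let earliest := series_list.foldl (fun acc series =>
      let start_date := pvStart series
      if start_date < acc then start_date else acc) "9999-12-31"
  (earliest, series_list.filter (fun s => pvStart s == earliest))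

-- ===== PORT B =====
def find_earliest_common_start_date_alt (series_list : List (List (String × String))) : String × (List (List (String × String))) :=
  series_list.foldl (fun st series =>
      let start_date := pvStart series
      if start_date < st.1 then (start_date, [series])
      else if start_date == st.1 then (st.1, st.2 ++ [series])
      else st) ("9999-12-31", [])

-- ===== PRECONDITION & SPEC =====
-- Pre_ excludes series dicts missing the 'observation_start' key, on which Python A raises KeyError.
def Pre_find_earliest_common_start_date (series_list : List (List (String × String))) : Prop :=
  (series_list.all (fun s => (PySem.Dict.mk s).contains "observation_start")) = true
instance (series_list : List (List (String × String))) : Decidable (Pre_find_earliest_common_start_date series_list) := by unfold Pre_find_earliest_common_start_date; infer_instance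
def pvWitness_find_earliest_common_start_date : (List (List (String × String))) :=
  [[("observation_start", "2000-01-01")], [("observation_start", "1999-05-01")]]
def Spec_find_earliest_common_start_date (series_list : List (List (String × String))) (out : String × (List (List (String × String)))) : Prop := out = find_earliest_common_start_date_alt series_list
instance (series_list : List (List (String × String))) (out : String × (List (List (String × String)))) : Decidable (Spec_find_earliest_common_start_date series_list out) := by unfold Spec_find_earliest_common_start_date; infer_instance

-- ===== CLAIM (what is proved, stated in full; the proofs are below) =====
def Claim_equal_find_earliest_common_start_date : Prop := ∀ (series_list : List (List (String × String))), Dom_find_earliest_common_start_date series_list → Pre_find_earliest_common_start_date series_list → Spec_find_earliest_common_start_date series_list (find_earliest_common_start_date series_list)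

-- ===== LEMMAS AND PROOFS =====

-- A's min loop, as a standalone fold.
def pvMinFold (l : List (List (String × String))) (m : String) : String :=
  l.foldl (fun acc series => if pvStart series < acc then pvStart series else acc) m

lemma pvMinFold_le (l : List (List (String × String))) (m : String) : pvMinFold l m ≤ m := by
  induction l generalizing m with
  | nil => simp [pvMinFold]
  | cons s t ih =>
    simp only [pvMinFold, List.foldl_cons]
    split_ifs with h
    · exact le_of_lt (lt_of_le_of_lt (ih _) h)
    · exact ih m

-- Invariant of B's fused loop: it computes A's running minimum, and the bucket is the
-- filter of the processed prefix by that final minimum (discarding the incoming bucket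
-- whenever the minimum strictly drops).
lemma pvMinFold_cons (s : List (String × String)) (t : List (List (String × String))) (m : String) :
    pvMinFold (s :: t) m = pvMinFold t (if pvStart s < m then pvStart s else m) := rfl

lemma loop_inv (l : List (List (String × String))) (m : String) (b : List (List (String × String))) :
    l.foldl (fun st series =>
        let start_date := pvStart series
        if start_date < st.1 then (start_date, [series])
        else if start_date == st.1 then (st.1, st.2 ++ [series])
        else st) (m, b)
    = (pvMinFold l m,
       (if pvMinFold l m = m then b else []) ++ l.filter (fun s => pvStart s == pvMinFold l m)) := by
  induction l generalizing m b with
  | nil => simp [pvMinFold]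
  | cons s t ih =>
    simp only [List.foldl_cons, pvMinFold_cons, List.filter_cons]
    by_cases h1 : pvStart s < m
    · simp only [if_pos h1]
      rw [ih]
      have hle : pvMinFold t (pvStart s) ≤ pvStart s := pvMinFold_le t (pvStart s)
      have hne : pvMinFold t (pvStart s) ≠ m := ne_of_lt (lt_of_le_of_lt hle h1)
      by_cases h2 : pvMinFold t (pvStart s) = pvStart s
      · simp [h2, ne_of_lt h1]
      · have hb : (pvStart s == pvMinFold t (pvStart s)) = false :=
          beq_eq_false_iff_ne.mpr (fun h => h2 h.symm)
        simp [h2, hne, hb]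
    · simp only [if_neg h1]
      by_cases h2 : pvStart s = m
      · simp only [h2, beq_self_eq_true, if_true]
        rw [ih]
        by_cases h3 : pvMinFold t m = m
        · simp [h3, List.append_assoc]
        · have hb : (m == pvMinFold t m) = false :=
            beq_eq_false_iff_ne.mpr (fun h => h3 h.symm)
          simp [hb, h3]
      · have hbe : (pvStart s == m) = false := beq_eq_false_iff_ne.mpr h2
        rw [show (if (pvStart s == m) = true then (m, b ++ [s]) else (m, b)) = (m, b) from by simp [hbe]]
        rw [ih]
        have hlt : m < pvStart s := lt_of_le_of_ne (not_lt.mp h1) (Ne.symm h2)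
        have hb : (pvStart s == pvMinFold t m) = false := by
          refine beq_eq_false_iff_ne.mpr (fun h => ?_)
          have hle := pvMinFold_le t m
          rw [← h] at hle
          exact absurd hle (not_le.mpr hlt)
        simp [hb]

-- ===== VERDICT (by name: the statement is the Claim_ definition above) =====
theorem find_earliest_common_start_date_spec : Claim_equal_find_earliest_common_start_date := by
  intro series_list _ _
  unfold Spec_find_earliest_common_start_date find_earliest_common_start_date find_earliest_common_start_date_alt
  rw [loop_inv]
  simp [pvMinFold]
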